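-- pv_equiv track=rewrite | github.com/JohnyAnderson/DeepMU | analysis_compare.py | extract_result_and_metric
-- ===== SOURCE A (Python) =====
-- def extract_result_and_metric(text: str):
--     result = "wrong"
--     metric = "FN"
--     lines = [line.strip().lower() for line in text.strip().splitlines() if line.strip()]
--     for line in lines:
--         if line.startswith("result:"):
--             val = line.split(":", 1)[-1].strip()
--             if val in ["correct", "partly correct", "wrong"]:
--                 result = val
--         if line.startswith("verdict:"):
--             val = line.split(":", 1)[-1].strip().upper()
--             if val in ["TP", "FP", "FN"]:
--                 metric = val
--     return result, metric
-- ===== SOURCE B (Python) =====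
-- def extract_result_and_metric(text: str):
--     lines = [line.strip().lower() for line in text.strip().splitlines() if line.strip()]
--     result = next((line[len("result:"):].strip()
--                    for line in reversed(lines)
--                    if line.startswith("result:")
--                    and line[len("result:"):].strip() in ("correct", "partly correct", "wrong")),
--                   "wrong")
--     metric = next((line[len("verdict:"):].strip().upper()
--                    for line in reversed(lines)
--                    if line.startswith("verdict:")
--                    and line[len("verdict:"):].strip().upper() in ("TP", "FP", "FN")),
--                   "FN")
--     return result, metric
-- ===== Notes on version B (the rewrite author's own statement) =====
-- stated objective: alternative
-- what changed: A makes one forward pass maintaining two mutable scalars (last valid line wins); B instead runs two independent backward searches over reversed(lines) that early-return the first valid 'result:' / 'verdict:' value (first-in-reverse = last-valid-wins), slicing off the fixed prefix instead of split(':',1).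
import Mathlib
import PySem

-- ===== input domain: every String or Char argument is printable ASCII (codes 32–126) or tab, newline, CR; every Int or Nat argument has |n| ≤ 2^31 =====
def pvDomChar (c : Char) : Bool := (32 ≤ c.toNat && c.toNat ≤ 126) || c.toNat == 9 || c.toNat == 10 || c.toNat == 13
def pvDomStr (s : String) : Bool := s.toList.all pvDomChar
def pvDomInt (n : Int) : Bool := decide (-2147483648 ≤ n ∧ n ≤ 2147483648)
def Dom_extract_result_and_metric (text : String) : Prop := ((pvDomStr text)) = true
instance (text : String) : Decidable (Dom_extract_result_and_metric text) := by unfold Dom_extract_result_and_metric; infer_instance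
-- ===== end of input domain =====

-- B replaces A's forward accumulation over two scalars by two independent backward first-match
-- searches over the reversed line list (last-valid-wins = first-in-reverse); same cost, alternative structure.

-- ===== PORT A =====
-- the body of A's `for line in lines` loop (state = (result, metric))
def pvStepA (st : List Char × List Char) (line : List Char) : List Char × List Char :=
  let r :=
    if PySem.Chars.startswith line "result:".toList then
      let val := PySem.Chars.strip (PySem.List.pyGetD (PySem.Chars.splitOnMax line [':'] 1) (-1) [])
      if val ∈ ["correct".toList, "partly correct".toList, "wrong".toList] then val else st.1
    else st.1
  let m :=
    if PySem.Chars.startswith line "verdict:".toList then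
      let val := PySem.Chars.upper (PySem.Chars.strip (PySem.List.pyGetD (PySem.Chars.splitOnMax line [':'] 1) (-1) []))
      if val ∈ ["TP".toList, "FP".toList, "FN".toList] then val else st.2
    else st.2
  (r, m)

def extract_result_and_metric (text : String) : String × String :=
  let lines := ((PySem.Chars.splitlines (PySem.Chars.strip text.toList)).filter
      (fun l => !(PySem.Chars.strip l).isEmpty)).map (fun l => PySem.Chars.lower (PySem.Chars.strip l))
  let st := lines.foldl pvStepA ("wrong".toList, "FN".toList)
  (String.ofList st.1, String.ofList st.2)

-- ===== PORT B =====
-- B's generator filter+map for the 'result' search: some v iff the line passes the filter, v the yielded value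
def pvResVal? (line : List Char) : Option (List Char) :=
  if PySem.Chars.startswith line "result:".toList then
    let v := PySem.Chars.strip (line.drop 7)   -- line[len("result:"):].strip()
    if v ∈ ["correct".toList, "partly correct".toList, "wrong".toList] then some v else none
  else none

-- B's generator filter+map for the 'verdict' search
def pvVerVal? (line : List Char) : Option (List Char) :=
  if PySem.Chars.startswith line "verdict:".toList then
    let v := PySem.Chars.upper (PySem.Chars.strip (line.drop 8))   -- line[len("verdict:"):].strip().upper()
    if v ∈ ["TP".toList, "FP".toList, "FN".toList] then some v else none
  else none

-- next(generator, default): first match wins, early return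
def pvFindD (f : List Char → Option (List Char)) (d : List Char) : List (List Char) → List Char
  | [] => d
  | l :: ls =>
    match f l with
    | some v => v
    | none => pvFindD f d ls

def extract_result_and_metric_alt (text : String) : String × String :=
  let lines := ((PySem.Chars.splitlines (PySem.Chars.strip text.toList)).filter
      (fun l => !(PySem.Chars.strip l).isEmpty)).map (fun l => PySem.Chars.lower (PySem.Chars.strip l))
  (String.ofList (pvFindD pvResVal? "wrong".toList lines.reverse),
   String.ofList (pvFindD pvVerVal? "FN".toList lines.reverse))

-- ===== PRECONDITION & SPEC =====
def Spec_extract_result_and_metric (text : String) (out : String × String) : Prop := out = extract_result_and_metric_alt text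
instance (text : String) (out : String × String) : Decidable (Spec_extract_result_and_metric text out) := by unfold Spec_extract_result_and_metric; infer_instance

-- ===== CLAIM =====
def Claim_equal_extract_result_and_metric : Prop := ∀ (text : String), Dom_extract_result_and_metric text → Spec_extract_result_and_metric text (extract_result_and_metric text)

-- ===== LEMMAS AND PROOFS =====

-- splitOnMax.go with maxsplit exhausted just returns the remainder as the last piece
theorem pv_go_zero (fuel : Nat) (l cur : List Char) (acc : List (List Char)) :
    PySem.Chars.splitOnMax.go [':'] fuel 0 l cur acc = ((cur.reverse ++ l) :: acc).reverse := by
  cases fuel with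
  | zero => simp [PySem.Chars.splitOnMax.go]
  | succ f => cases l with
    | nil => simp [PySem.Chars.splitOnMax.go]
    | cons c cs => simp [PySem.Chars.splitOnMax.go]

-- splitOnMax.go with maxsplit 1 on a string whose first colon follows p
theorem pv_go_spec (p : List Char) (hp : ':' ∉ p) :
    ∀ (fuel : Nat), p.length < fuel → ∀ (rest cur : List Char) (acc : List (List Char)),
    PySem.Chars.splitOnMax.go [':'] fuel 1 (p ++ ':' :: rest) cur acc
      = acc.reverse ++ [cur.reverse ++ p, rest] := by
  induction p with
  | nil =>
    intro fuel hf rest cur acc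
    cases fuel with
    | zero => omega
    | succ f =>
      simp only [List.nil_append]
      simp [PySem.Chars.splitOnMax.go, List.isPrefixOf, pv_go_zero]
  | cons c p' ih =>
    intro fuel hf rest cur acc
    cases fuel with
    | zero => simp at hf
    | succ f =>
      have hc : c ≠ ':' := fun h => hp (by simp [h])
      have hp' : ':' ∉ p' := fun h => hp (by simp [h])
      simp only [List.cons_append]
      rw [show PySem.Chars.splitOnMax.go [':'] (f+1) 1 (c :: (p' ++ ':' :: rest)) cur acc
            = PySem.Chars.splitOnMax.go [':'] f 1 (p' ++ ':' :: rest) (c :: cur) acc from by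
        simp [PySem.Chars.splitOnMax.go, List.isPrefixOf, (by simpa using hc.symm : ¬ (':' = c))]]
      rw [ih hp' f (by simpa using hf) rest (c :: cur) acc]
      simp

-- line.split(":", 1) when line = p + ":" + rest and p is colon-free
theorem pv_splitOnMax_colon (p rest : List Char) (hp : ':' ∉ p) :
    PySem.Chars.splitOnMax (p ++ ':' :: rest) [':'] 1 = [p, rest] := by
  rw [PySem.Chars.splitOnMax]
  simp only [show ¬ ((1:Int) < 0) from by omega, if_false, show Int.toNat 1 = 1 from rfl]
  rw [pv_go_spec p hp _ (by simp) rest [] []]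
  simp

-- when `line` starts with a colon-free prefix p followed by ':', A's split-value IS the tail after p ++ ":"
theorem pv_splitval (p t : List Char) (hp : ':' ∉ p) :
    PySem.List.pyGetD (PySem.Chars.splitOnMax (p ++ ':' :: t) [':'] 1) (-1) [] = t := by
  rw [pv_splitOnMax_colon p t hp]
  exact PySem.List.pyGetD_neg_one_append_singleton [p] t []

-- one step of A equals the option view given by B's two generator bodies
theorem pv_step_char (st : List Char × List Char) (line : List Char) :
    pvStepA st line = ((pvResVal? line).getD st.1, (pvVerVal? line).getD st.2) := by
  have hres : "result:".toList = "result".toList ++ ':' :: [] := rfl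
  have hver : "verdict:".toList = "verdict".toList ++ ':' :: [] := rfl
  by_cases hr : PySem.Chars.startswith line "result:".toList
  · obtain ⟨t, ht⟩ := (PySem.Chars.startswith_iff line _).mp hr
    have hline : line = "result".toList ++ ':' :: t := by
      rw [← ht, hres]; simp
    have hnv : PySem.Chars.startswith line "verdict:".toList = false := by
      cases hb : PySem.Chars.startswith line "verdict:".toList with
      | false => rfl
      | true =>
        obtain ⟨u, hu⟩ := (PySem.Chars.startswith_iff line _).mp hb
        rw [hline] at hu
        exact absurd (congrArg (fun l => l.take 4) hu) (by simp)
    have hdrop : line.drop 7 = t := by rw [hline]; rfl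
    have hsp : PySem.List.pyGetD (PySem.Chars.splitOnMax line [':'] 1) (-1) [] = t := by
      rw [hline]; exact pv_splitval _ t (by decide)
    simp only [pvStepA, pvResVal?, pvVerVal?, hr, hnv, if_true, Bool.false_eq_true, if_false,
      hdrop, hsp]
    split_ifs with h
    · simp
    · simp
  · have hr' : PySem.Chars.startswith line "result:".toList = false := by
      cases hb : PySem.Chars.startswith line "result:".toList with
      | false => rfl
      | true => exact absurd hb hr
    by_cases hv : PySem.Chars.startswith line "verdict:".toList
    · obtain ⟨t, ht⟩ := (PySem.Chars.startswith_iff line _).mp hv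
      have hline : line = "verdict".toList ++ ':' :: t := by
        rw [← ht, hver]; simp
      have hdrop : line.drop 8 = t := by rw [hline]; rfl
      have hsp : PySem.List.pyGetD (PySem.Chars.splitOnMax line [':'] 1) (-1) [] = t := by
        rw [hline]; exact pv_splitval _ t (by decide)
      simp only [pvStepA, pvResVal?, pvVerVal?, hr', hv, if_true, Bool.false_eq_true, if_false,
        hdrop, hsp]
      split_ifs with h
      · simp
      · simp
    · have hv' : PySem.Chars.startswith line "verdict:".toList = false := by
        cases hb : PySem.Chars.startswith line "verdict:".toList with
        | false => rfl
        | true => exact absurd hb hv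
      simp only [pvStepA, pvResVal?, pvVerVal?, hr', hv', Bool.false_eq_true, if_false,
        Option.getD_none]

-- first-match over an append: if the front has no match, fall into the back
theorem pv_findD_append (f : List Char → Option (List Char)) (d : List Char) :
    ∀ (xs ys : List (List Char)), pvFindD f d (xs ++ ys) = pvFindD f (pvFindD f d ys) xs := by
  intro xs ys
  induction xs with
  | nil => rfl
  | cons x xs ih =>
    simp only [List.cons_append, pvFindD]
    cases f x with
    | some v => rfl
    | none => exact ih

-- A's forward fold equals B's two backward searches, for any starting defaults
theorem pv_loop (lines : List (List Char)) : ∀ (r m : List Char),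
    lines.foldl pvStepA (r, m)
      = (pvFindD pvResVal? r lines.reverse, pvFindD pvVerVal? m lines.reverse) := by
  induction lines with
  | nil => intro r m; rfl
  | cons l ls ih =>
    intro r m
    simp only [List.foldl_cons, List.reverse_cons]
    rw [pv_step_char (r, m) l, ih,
        pv_findD_append pvResVal? r ls.reverse [l],
        pv_findD_append pvVerVal? m ls.reverse [l]]
    have h1 : pvFindD pvResVal? r [l] = (pvResVal? l).getD r := by
      simp only [pvFindD]; cases pvResVal? l <;> rfl
    have h2 : pvFindD pvVerVal? m [l] = (pvVerVal? l).getD m := by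
      simp only [pvFindD]; cases pvVerVal? l <;> rfl
    rw [h1, h2]

-- ===== VERDICT =====
theorem extract_result_and_metric_spec : Claim_equal_extract_result_and_metric := by
  intro text _
  unfold Spec_extract_result_and_metric
  simp only [extract_result_and_metric, extract_result_and_metric_alt]
  rw [pv_loop]
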